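-- pv_equiv track=rewrite | github.com/Mitlyy/DB_tech_lab_5 | scripts/peek_off.py | pick_present_numeric_cols
-- ===== SOURCE A (Python) =====
-- FEATURE_NAME_CANDIDATES = {
--     "energy": ["energy-kcal_100g", "energy-kj_100g", "energy_100g"],
--     "fat": ["fat_100g", "total-fat_100g"],
--     "saturated_fat": ["saturated-fat_100g", "saturated_fat_100g"],
--     "carbs": ["carbohydrates_100g", "carbs_100g"],
--     "sugars": ["sugars_100g"],
--     "fiber": ["fiber_100g", "dietary-fiber_100g", "dietary_fiber_100g"],
--     "proteins": ["proteins_100g", "protein_100g"],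
--     "salt": ["salt_100g"],
--     "sodium": ["sodium_100g"],
-- }
--
-- def pick_present_numeric_cols(all_cols):
--     """Выбираем реально существующие числовые колонки из карты синонимов."""
--     lower2orig = {c.lower(): c for c in all_cols}
--     present = []
--     logical2actual = {}
--     for logical, cands in FEATURE_NAME_CANDIDATES.items():
--         for cand in cands:
--             c_l = cand.lower()
--             if c_l in lower2orig:
--                 present.append(lower2orig[c_l])
--                 logical2actual[logical] = lower2orig[c_l]
--                 break
--     return present, logical2actual
-- ===== SOURCE B (Python) =====
-- FEATURE_NAME_CANDIDATES = {
--     "energy": ["energy-kcal_100g", "energy-kj_100g", "energy_100g"],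
--     "fat": ["fat_100g", "total-fat_100g"],
--     "saturated_fat": ["saturated-fat_100g", "saturated_fat_100g"],
--     "carbs": ["carbohydrates_100g", "carbs_100g"],
--     "sugars": ["sugars_100g"],
--     "fiber": ["fiber_100g", "dietary-fiber_100g", "dietary_fiber_100g"],
--     "proteins": ["proteins_100g", "protein_100g"],
--     "salt": ["salt_100g"],
--     "sodium": ["sodium_100g"],
-- }
--
-- def pick_present_numeric_cols(all_cols):
--     """Inverted traversal: instead of iterating candidate names and looking
--     columns up, scan the columns for each feature and keep the column whose
--     candidate rank is minimal (argmin; ties broken by the later column)."""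
--     cols = list(all_cols)
--     present = []
--     logical2actual = {}
--     for logical, cands in FEATURE_NAME_CANDIDATES.items():
--         lowers = [cand.lower() for cand in cands]
--         best = None  # (rank, column)
--         for col in cols:
--             low = col.lower()
--             if low in lowers:
--                 rank = lowers.index(low)
--                 if best is None or rank <= best[0]:
--                     best = (rank, col)
--         if best is not None:
--             present.append(best[1])
--             logical2actual[logical] = best[1]
--     return present, logical2actual
-- ===== Notes on version B (the rewrite author's own statement) =====
-- stated objective: alternative
-- what changed: B inverts the traversal: instead of building a lowercase->original index and iterating candidate names with dict lookups and a break, it scans the column list per feature, computing each column's candidate rank with list.index and keeping the argmin (ties -> later column), so no index structure and no candidate-driven search exists.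
import Mathlib
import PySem

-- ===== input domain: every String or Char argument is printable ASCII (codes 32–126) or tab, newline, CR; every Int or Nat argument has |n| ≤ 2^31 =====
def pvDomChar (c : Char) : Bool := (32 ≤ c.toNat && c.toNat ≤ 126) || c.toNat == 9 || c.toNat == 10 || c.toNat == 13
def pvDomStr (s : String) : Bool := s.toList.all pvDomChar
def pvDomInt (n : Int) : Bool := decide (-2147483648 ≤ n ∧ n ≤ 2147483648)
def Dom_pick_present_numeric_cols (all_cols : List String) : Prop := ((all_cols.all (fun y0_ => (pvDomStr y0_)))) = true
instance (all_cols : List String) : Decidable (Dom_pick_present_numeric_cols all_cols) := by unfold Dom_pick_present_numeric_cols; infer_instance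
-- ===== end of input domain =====

-- B inverts the traversal: no lowercase index, no candidate-driven lookup — per feature it
-- scans the columns, computes each column's candidate rank and keeps the argmin (ties → later column).

-- module constant FEATURE_NAME_CANDIDATES, in dict insertion order (shared by both ports)
def featureNameCandidates : List (String × List String) :=
  [ ("energy", ["energy-kcal_100g", "energy-kj_100g", "energy_100g"]),
    ("fat", ["fat_100g", "total-fat_100g"]),
    ("saturated_fat", ["saturated-fat_100g", "saturated_fat_100g"]),
    ("carbs", ["carbohydrates_100g", "carbs_100g"]),
    ("sugars", ["sugars_100g"]),
    ("fiber", ["fiber_100g", "dietary-fiber_100g", "dietary_fiber_100g"]),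
    ("proteins", ["proteins_100g", "protein_100g"]),
    ("salt", ["salt_100g"]),
    ("sodium", ["sodium_100g"]) ]

-- ===== PORT A =====
-- inner 'for cand in cands: … break' loop of A: dict lookup in lower2orig
def pickA_inner (lower2orig : PySem.Dict String String) (logical : String) :
    List String → List String × PySem.Dict String String → List String × PySem.Dict String String
  | [], st => st
  | cand :: rest, st =>
      let c_l := PySem.Str.lower cand
      match lower2orig.get? c_l with      -- 'if c_l in lower2orig' then 'lower2orig[c_l]'
      | some v => (st.1 ++ [v], st.2.insert logical v)   -- append + assign, then break
      | none => pickA_inner lower2orig logical rest st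

def pick_present_numeric_cols (all_cols : List String) : List String × (List (String × String)) :=
  let lower2orig := all_cols.foldl (fun d c => d.insert (PySem.Str.lower c) c) PySem.Dict.empty
  let st := featureNameCandidates.foldl
      (fun st lc => pickA_inner lower2orig lc.1 lc.2 st) ([], PySem.Dict.empty)
  (st.1, st.2.items)

-- ===== PORT B =====
-- inner 'for col in cols' loop of B: argmin over columns of the candidate rank (ties → later column)
def pickB_best (lowers : List String) (cols : List String) : Option (Nat × String) :=
  cols.foldl
    (fun best col =>
      let low := PySem.Str.lower col
      match PySem.List.index? lowers low with     -- 'if low in lowers: rank = lowers.index(low)'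
      | some rank =>
          match best with
          | none => some (rank, col)
          | some (r0, _) => if rank ≤ r0 then some (rank, col) else best
      | none => best)
    none

def pick_present_numeric_cols_alt (all_cols : List String) : List String × (List (String × String)) :=
  let st := featureNameCandidates.foldl
      (fun st lc =>
        let lowers := lc.2.map PySem.Str.lower
        match pickB_best lowers all_cols with
        | some (_, c) => (st.1 ++ [c], st.2.insert lc.1 c)
        | none => st)
      ([], PySem.Dict.empty)
  (st.1, st.2.items)

-- ===== PRECONDITION & SPEC =====
def Spec_pick_present_numeric_cols (all_cols : List String) (out : List String × (List (String × String))) : Prop := out = pick_present_numeric_cols_alt all_cols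
instance (all_cols : List String) (out : List String × (List (String × String))) : Decidable (Spec_pick_present_numeric_cols all_cols out) := by unfold Spec_pick_present_numeric_cols; infer_instance

-- ===== CLAIM =====
def Claim_equal_pick_present_numeric_cols : Prop := ∀ (all_cols : List String), Dom_pick_present_numeric_cols all_cols → Spec_pick_present_numeric_cols all_cols (pick_present_numeric_cols all_cols)

-- ===== LEMMAS AND PROOFS =====

-- first candidate (from index i on) that has a matching column, with the last such column
def aPickI (cols : List String) : Nat → List String → Option (Nat × String)
  | _, [] => none
  | i, cand :: rest =>
      match cols.reverse.find? (fun c => PySem.Str.lower c == PySem.Str.lower cand) with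
      | some v => some (i, v)
      | none => aPickI cols (i+1) rest

lemma aPickI_ge (cols : List String) (i : Nat) (cands : List String) (j : Nat) (v : String)
    (h : aPickI cols i cands = some (j, v)) : i ≤ j := by
  induction cands generalizing i with
  | nil => simp [aPickI] at h
  | cons cand rest ih =>
      simp only [aPickI] at h
      cases hf : cols.reverse.find? (fun c => PySem.Str.lower c == PySem.Str.lower cand) with
      | some w => rw [hf] at h; simp at h; omega
      | none => rw [hf] at h; exact Nat.le_of_succ_le (ih _ h)

-- lookup in A's last-wins lowercase index = first match in the reversed list
lemma get?_build (xs : List String) (d0 : PySem.Dict String String) (k : String) :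
    (xs.foldl (fun d c => d.insert (PySem.Str.lower c) c) d0).get? k =
      ((xs.reverse.find? (fun c => PySem.Str.lower c == k)).or (d0.get? k)) := by
  induction xs generalizing d0 with
  | nil => simp
  | cons x xs ih =>
      simp only [List.foldl_cons, List.reverse_cons, List.find?_append, ih]
      cases h : xs.reverse.find? (fun c => PySem.Str.lower c == k) with
      | some v => simp [Option.or]
      | none =>
          by_cases hk : PySem.Str.lower x = k
          · subst hk; simp [Option.or, List.find?, PySem.Dict.get?_insert_self]
          · rw [PySem.Dict.get?_insert]
            have hb : (PySem.Str.lower x == k) = false := by simp [hk]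
            rw [if_neg (fun e => hk e.symm)]
            simp [List.find?, hb, Option.or]

-- A's inner candidate loop computes aPickI's value
lemma pickA_inner_eq (cols : List String) (logical : String) (cands : List String)
    (i : Nat) (st : List String × PySem.Dict String String) :
    pickA_inner (cols.foldl (fun d c => d.insert (PySem.Str.lower c) c) PySem.Dict.empty) logical cands st
      = match aPickI cols i cands with
        | some (_, v) => (st.1 ++ [v], st.2.insert logical v)
        | none => st := by
  induction cands generalizing i with
  | nil => rfl
  | cons cand rest ih =>
      simp only [pickA_inner, aPickI, get?_build]
      cases h : cols.reverse.find? (fun c => PySem.Str.lower c == PySem.Str.lower cand) with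
      | some v => simp [Option.or]
      | none => simpa [Option.or] using ih (i+1)

-- aPickI finds nothing among no columns
lemma aPickI_nil (cands : List String) (i : Nat) : aPickI [] i cands = none := by
  induction cands generalizing i with
  | nil => rfl
  | cons c r ih => simp [aPickI, ih]

-- how aPickI changes when a column is appended: exactly B's argmin step
lemma aPickI_snoc (xs : List String) (x : String) (i : Nat) (cands : List String) :
    aPickI (xs ++ [x]) i cands =
      match PySem.List.index? (cands.map PySem.Str.lower) (PySem.Str.lower x) with
      | some r =>
          match aPickI xs i cands with
          | none => some (i + r, x)
          | some (j, v) => if i + r ≤ j then some (i + r, x) else some (j, v)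
      | none => aPickI xs i cands := by
  induction cands generalizing i with
  | nil => simp [aPickI, PySem.List.index?]
  | cons cand rest ih =>
      by_cases hx : PySem.Str.lower cand = PySem.Str.lower x
      · -- head candidate matches x: rank 0, the new find hits x (the last column)
        have hidx : PySem.List.index? (PySem.Str.lower cand :: rest.map PySem.Str.lower) (PySem.Str.lower x) = some 0 := by
          rw [hx]; exact PySem.List.index?_cons_self _ _
        have hb : (PySem.Str.lower x == PySem.Str.lower cand) = true := by simp [hx]
        simp only [aPickI, List.reverse_append, List.reverse_singleton, List.singleton_append,
          List.find?_cons, List.map_cons, hidx, hb]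
        cases hf : xs.reverse.find? (fun c => PySem.Str.lower c == PySem.Str.lower cand) with
        | some v =>
            have hj : i ≤ i := le_refl i
            simp
        | none =>
            cases ha : aPickI xs (i+1) rest with
            | none => simp
            | some jv =>
                obtain ⟨j, v⟩ := jv
                have hge : i + 1 ≤ j := aPickI_ge xs (i+1) rest j v ha
                have : i ≤ j := by omega
                simp [this]
      · -- head candidate does not match x
        have hb : (PySem.Str.lower x == PySem.Str.lower cand) = false := by
          simp; exact fun e => hx e.symm
        have hidx : PySem.List.index? (PySem.Str.lower cand :: rest.map PySem.Str.lower) (PySem.Str.lower x)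
            = (PySem.List.index? (rest.map PySem.Str.lower) (PySem.Str.lower x)).map (· + 1) :=
          PySem.List.index?_cons_of_ne _ hx
        simp only [aPickI, List.reverse_append, List.reverse_singleton, List.singleton_append,
          List.find?_cons, List.map_cons, hidx, hb]
        cases hf : xs.reverse.find? (fun c => PySem.Str.lower c == PySem.Str.lower cand) with
        | some v =>
            -- head candidate already matched in xs: keep (i, v) (any rank via x is ≥ 1)
            cases hr : PySem.List.index? (rest.map PySem.Str.lower) (PySem.Str.lower x) with
            | none => simp
            | some r =>
                have hlt : ¬ (i + (r + 1) ≤ i) := by omega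
                simp [Option.map, hlt]
        | none =>
            -- recurse on rest with index i+1
            cases hr : PySem.List.index? (rest.map PySem.Str.lower) (PySem.Str.lower x) with
            | none =>
                have hih := ih (i+1); rw [hr] at hih; simpa using hih
            | some r =>
                have hih := ih (i+1); rw [hr] at hih
                have harith : i + 1 + r = i + (r + 1) := by omega
                cases ha : aPickI xs (i+1) rest with
                | none =>
                    rw [ha] at hih; simp at hih
                    simp [hih, harith]
                | some jv =>
                    obtain ⟨j, v⟩ := jv
                    rw [ha] at hih; simp at hih; rw [harith] at hih
                    simp [hih]

-- B's column scan computes aPickI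
lemma pickB_best_eq (cols : List String) (cands : List String) :
    pickB_best (cands.map PySem.Str.lower) cols = aPickI cols 0 cands := by
  induction cols using List.reverseRecOn with
  | nil =>
      simp [pickB_best, aPickI_nil]
  | append_singleton xs x ih =>
      have hsnoc := aPickI_snoc xs x 0 cands
      simp only [pickB_best, List.foldl_append, List.foldl_cons, List.foldl_nil] at *
      rw [ih] at *
      rw [hsnoc]
      cases hr : PySem.List.index? (cands.map PySem.Str.lower) (PySem.Str.lower x) with
      | none => simp
      | some r =>
          cases ha : aPickI xs 0 cands with
          | none => simp
          | some jv => obtain ⟨j, v⟩ := jv; simp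

-- per-feature steps of the two top-level folds agree
lemma step_eq (cols : List String) (st : List String × PySem.Dict String String) (lc : String × List String) :
    pickA_inner (cols.foldl (fun d c => d.insert (PySem.Str.lower c) c) PySem.Dict.empty) lc.1 lc.2 st
      = match pickB_best (lc.2.map PySem.Str.lower) cols with
        | some (_, c) => (st.1 ++ [c], st.2.insert lc.1 c)
        | none => st := by
  rw [pickB_best_eq, pickA_inner_eq cols lc.1 lc.2 0 st]

-- ===== VERDICT =====
theorem pick_present_numeric_cols_spec : Claim_equal_pick_present_numeric_cols := by
  intro all_cols _
  unfold Spec_pick_present_numeric_cols pick_present_numeric_cols pick_present_numeric_cols_alt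
  have hfun : (fun (st : List String × PySem.Dict String String) (lc : String × List String) =>
      pickA_inner (all_cols.foldl (fun d c => d.insert (PySem.Str.lower c) c) PySem.Dict.empty) lc.1 lc.2 st)
    = (fun st lc =>
        match pickB_best (lc.2.map PySem.Str.lower) all_cols with
        | some (_, c) => (st.1 ++ [c], st.2.insert lc.1 c)
        | none => st) := by
    funext st lc; exact step_eq all_cols st lc
  simp only [hfun]
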